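-- pv_equiv track=rewrite | github.com/AhmadZubayer/Competitive-Programming | Codeforces Problemsets/2082-A_Binary_Matrix.py | check_good_matrix
-- ===== SOURCE A (Python) =====
-- def check_good_matrix(matrix, n, m):
--     count_row = 0
--     count_col = 0
--     for i in range(n):
--         row_sum = sum(matrix[i])
--         if row_sum % 2 != 0:
--             count_row += 1
--
--     for j in range(m):
--         col_sum = sum(matrix[i][j] for i in range(n))
--         if col_sum % 2 != 0:
--             count_col += 1
--
--     return (max(count_col,count_row))
-- ===== SOURCE B (Python) =====
-- def check_good_matrix(matrix, n, m):
--     col = [0] * m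
--     count_row = 0
--     for i in range(n):
--         row = matrix[i]
--         if sum(row) % 2 != 0:
--             count_row += 1
--         col = [col[j] + row[j] for j in range(m)]
--     count_col = sum(c % 2 for c in col)
--     return max(count_col, count_row)
-- ===== Notes on version B (the rewrite author's own statement) =====
-- stated objective: alternative
-- what changed: B makes a single pass over the rows, accumulating a column-sum table and the odd-row count together, then counts odd column sums, instead of A's second column-major pass that re-indexes the matrix m times.
import Mathlib
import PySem

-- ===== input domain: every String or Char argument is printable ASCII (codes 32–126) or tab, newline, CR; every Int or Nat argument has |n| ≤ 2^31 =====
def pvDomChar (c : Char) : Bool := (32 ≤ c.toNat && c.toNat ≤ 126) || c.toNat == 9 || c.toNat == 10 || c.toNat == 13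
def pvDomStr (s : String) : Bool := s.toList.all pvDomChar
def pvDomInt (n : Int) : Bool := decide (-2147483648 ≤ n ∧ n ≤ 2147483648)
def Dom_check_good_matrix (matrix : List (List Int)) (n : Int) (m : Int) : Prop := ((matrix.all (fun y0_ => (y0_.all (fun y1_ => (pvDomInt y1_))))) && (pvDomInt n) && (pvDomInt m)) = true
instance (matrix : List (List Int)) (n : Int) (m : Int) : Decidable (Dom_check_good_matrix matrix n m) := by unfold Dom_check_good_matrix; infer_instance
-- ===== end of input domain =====

-- B makes one pass over the rows, building the column-sum table alongside the odd-row count,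
-- instead of A's second column-major pass; return-value equivalence on Pre_ (where A returns).

-- ===== PORT A =====
def check_good_matrix (matrix : List (List Int)) (n : Int) (m : Int) : Int :=
  let count_row := (PySem.List.pyRange 0 n 1).foldl
    (fun acc i =>
      let row_sum := (PySem.List.pyGetD matrix i []).sum
      if PySem.Int.mod row_sum 2 ≠ 0 then acc + 1 else acc) 0
  let count_col := (PySem.List.pyRange 0 m 1).foldl
    (fun acc j =>
      let col_sum := (PySem.List.pyRange 0 n 1).foldl
        (fun s i => s + PySem.List.pyGetD (PySem.List.pyGetD matrix i []) j 0) 0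
      if PySem.Int.mod col_sum 2 ≠ 0 then acc + 1 else acc) 0
  max count_col count_row

-- ===== PORT B =====
-- follows Source B: in-range indexing matrix[i], col[j], row[j] is ported with pyGetD (exact under Pre_)
def check_good_matrix_alt (matrix : List (List Int)) (n : Int) (m : Int) : Int :=
  let st := (PySem.List.pyRange 0 n 1).foldl
    (fun st i =>
      let row := PySem.List.pyGetD matrix i []
      ((if PySem.Int.mod row.sum 2 ≠ 0 then st.1 + 1 else st.1),
       (PySem.List.pyRange 0 m 1).map
         (fun j => PySem.List.pyGetD st.2 j 0 + PySem.List.pyGetD row j 0)))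
    (0, List.replicate m.toNat 0)
  let count_col := (st.2.map (fun c => PySem.Int.mod c 2)).sum
  max count_col st.1

-- ===== PRECONDITION & SPEC =====
-- Pre_ excludes exactly the inputs where Python A raises IndexError: n exceeding the number of
-- rows, or a row among the first n shorter than m (with m > 0); B raises there too.
def Pre_check_good_matrix (matrix : List (List Int)) (n : Int) (m : Int) : Prop :=
  n.toNat ≤ matrix.length ∧ ∀ row ∈ matrix.take n.toNat, m.toNat ≤ row.length
instance (matrix : List (List Int)) (n : Int) (m : Int) : Decidable (Pre_check_good_matrix matrix n m) := by unfold Pre_check_good_matrix; infer_instance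

def pvWitness_check_good_matrix : List (List Int) × Int × Int := ([[1, 2], [3, 4]], 2, 2)

def Spec_check_good_matrix (matrix : List (List Int)) (n : Int) (m : Int) (out : Int) : Prop := out = check_good_matrix_alt matrix n m
instance (matrix : List (List Int)) (n : Int) (m : Int) (out : Int) : Decidable (Spec_check_good_matrix matrix n m out) := by unfold Spec_check_good_matrix; infer_instance

-- ===== CLAIM (what is proved, stated in full; the proofs are below) =====
def Claim_equal_check_good_matrix : Prop := ∀ (matrix : List (List Int)) (n : Int) (m : Int), Dom_check_good_matrix matrix n m → Pre_check_good_matrix matrix n m → Spec_check_good_matrix matrix n m (check_good_matrix matrix n m)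

-- ===== LEMMAS AND PROOFS =====

-- A's 'for i in range(N): … matrix[i] …' loop is the fold over the first N rows.
theorem foldl_range_getD {α β : Type} (xs : List α) (d : α) (N : Nat) (h : N ≤ xs.length)
    (f : β → α → β) (init : β) :
    (List.range N).foldl (fun acc k => f acc (xs.getD k d)) init
      = (xs.take N).foldl f init := by
  induction N with
  | zero => simp
  | succ N ih =>
    have hN : N < xs.length := by omega
    rw [List.range_succ, List.take_add_one, List.foldl_append, List.foldl_append,
      ih (by omega)]
    simp [List.getD, List.getElem?_eq_getElem hN]

-- pyRange 0 n 1 fold over matrix[i] as a fold over take n.toNat (Int version).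
theorem foldl_pyRange_getD {α β : Type} (xs : List α) (d : α) (n : Int) (h : n.toNat ≤ xs.length)
    (f : β → α → β) (init : β) :
    (PySem.List.pyRange 0 n 1).foldl (fun acc i => f acc (PySem.List.pyGetD xs i d)) init
      = (xs.take n.toNat).foldl f init := by
  rw [PySem.List.pyRange_one, List.foldl_map]
  have : ∀ (k : Nat), PySem.List.pyGetD xs ((0 : Int) + k) d = xs.getD k d := by
    intro k; simp
  simp only [this, Int.sub_zero]
  exact foldl_range_getD xs d n.toNat h f init

-- B's inner comprehension over pyRange as a map over List.range with plain getD
theorem inner_map (M : Nat) (c row : List Int) :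
    (PySem.List.pyRange 0 (M : Int) 1).map
        (fun j => PySem.List.pyGetD c j 0 + PySem.List.pyGetD row j 0)
      = (List.range M).map (fun j => c.getD j 0 + row.getD j 0) := by
  rw [PySem.List.pyRange_one, List.map_map]
  simp [Function.comp_def]

-- invariant of B's single pass: the pair fold splits into the row count and the column sums
theorem bfold (M : Nat) (rows : List (List Int)) (cr : Int) (g : Nat → Int) :
    rows.foldl (fun st row =>
        ((if PySem.Int.mod row.sum 2 ≠ 0 then st.1 + 1 else st.1),
         (List.range M).map (fun j => st.2.getD j 0 + row.getD j 0)))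
      (cr, (List.range M).map g)
    = (rows.foldl (fun acc row => if PySem.Int.mod row.sum 2 ≠ 0 then acc + 1 else acc) cr,
       (List.range M).map (fun j => g j + (rows.map (fun row => row.getD j 0)).sum)) := by
  induction rows generalizing cr g with
  | nil => simp
  | cons r rows ih =>
    simp only [List.foldl_cons, List.map_cons, List.sum_cons]
    have hcol : (List.range M).map (fun j => ((List.range M).map g).getD j 0 + r.getD j 0)
        = (List.range M).map (fun j => g j + r.getD j 0) := by
      apply List.map_congr_left
      intro j hj
      rw [List.getD_eq_getElem?_getD, List.getElem?_map,
        List.getElem?_range (List.mem_range.mp hj)]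
      rfl
    rw [hcol, ih]
    refine Prod.ext rfl ?_
    apply List.map_congr_left
    intro j _
    ring

-- counting odd values is summing the 0/1 Python remainders
theorem count_eq_summod (S : Nat → Int) (l : List Nat) (c : Int) :
    l.foldl (fun acc j => if PySem.Int.mod (S j) 2 ≠ 0 then acc + 1 else acc) c
      = c + (l.map (fun j => PySem.Int.mod (S j) 2)).sum := by
  induction l generalizing c with
  | nil => simp
  | cons a l ih =>
    have h0 : (0 : Int) ≤ PySem.Int.mod (S a) 2 := PySem.Int.mod_nonneg _ (by omega)
    have h2 : PySem.Int.mod (S a) 2 < 2 := PySem.Int.mod_lt _ (by omega)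
    simp only [List.foldl_cons, List.map_cons, List.sum_cons, ih]
    split_ifs with h
    · omega
    · omega

theorem check_good_matrix_eq (matrix : List (List Int)) (n m : Int)
    (h1 : n.toNat ≤ matrix.length) :
    check_good_matrix matrix n m = check_good_matrix_alt matrix n m := by
  simp only [check_good_matrix, check_good_matrix_alt]
  -- B's fold body, rewritten with List.range m.toNat and getD
  have hbody : ∀ (st : Int × List Int) (i : Int),
      ((if PySem.Int.mod (PySem.List.pyGetD matrix i []).sum 2 ≠ 0 then st.1 + 1 else st.1),
        (PySem.List.pyRange 0 m 1).map
          (fun j => PySem.List.pyGetD st.2 j 0 +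
            PySem.List.pyGetD (PySem.List.pyGetD matrix i []) j 0))
      = ((if PySem.Int.mod (PySem.List.pyGetD matrix i []).sum 2 ≠ 0 then st.1 + 1 else st.1),
        (List.range m.toNat).map
          (fun j => st.2.getD j 0 + (PySem.List.pyGetD matrix i []).getD j 0)) := by
    intro st i
    have : ((m.toNat : Int) : Int) = m ∨ m ≤ 0 := by omega
    rcases this with hm | hm
    · rw [← hm, inner_map]
      congr 2
    · have : (PySem.List.pyRange 0 m 1) = [] := by
        simp [PySem.List.pyRange_one]; omega
      have h2 : m.toNat = 0 := by omega
      rw [this, h2]; simp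
  simp only [hbody]
  have hrepl : (List.replicate m.toNat (0 : Int)) = (List.range m.toNat).map (fun _ => 0) := by
    simp [List.map_const']
  rw [hrepl,
    foldl_pyRange_getD matrix [] n h1
      (fun (st : Int × List Int) row =>
        ((if PySem.Int.mod row.sum 2 ≠ 0 then st.1 + 1 else st.1),
         (List.range m.toNat).map (fun j => st.2.getD j 0 + row.getD j 0))) _,
    bfold m.toNat (matrix.take n.toNat) 0 (fun _ => 0)]
  dsimp only
  -- row counts agree
  rw [foldl_pyRange_getD matrix [] n h1
    (fun acc row => if PySem.Int.mod row.sum 2 ≠ 0 then acc + 1 else acc) 0]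
  congr 1
  -- column counts agree
  have hin : ∀ j : Int,
      (PySem.List.pyRange 0 n 1).foldl
        (fun s i => s + PySem.List.pyGetD (PySem.List.pyGetD matrix i []) j 0) 0
      = ((matrix.take n.toNat).map (fun row => PySem.List.pyGetD row j 0)).sum := by
    intro j
    rw [foldl_pyRange_getD matrix [] n h1 (fun s row => s + PySem.List.pyGetD row j 0) 0]
    simp [PySem.List.foldl_add]
  simp only [hin]
  rw [PySem.List.pyRange_one 0 m, List.foldl_map]
  simp only [zero_add, Int.sub_zero, PySem.List.pyGetD_natCast]
  rw [count_eq_summod (fun k => ((matrix.take n.toNat).map (fun row => row.getD k 0)).sum)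
    (List.range m.toNat) 0]
  simp [List.map_map, Function.comp_def]

-- ===== VERDICT (by name: the statement is the Claim_ definition above) =====
theorem check_good_matrix_spec : Claim_equal_check_good_matrix := by
  intro matrix n m _ hpre
  exact check_good_matrix_eq matrix n m hpre.1
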